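-- pv_equiv track=rewrite | github.com/MrBrantCode/unitest_baseline | mut_generate/mist_train_taco/taco_10950/solution.py | find_max_f_value
-- ===== SOURCE A (Python) =====
-- def find_max_f_value(N, K, A):
--     BMAX = 40
--     d = [0] * BMAX
--
--     for a in A:
--         for i in range(BMAX):
--             if a & 1 << i:
--                 d[i] += 1
--
--     dp = [[-1 for _ in range(2)] for _ in range(BMAX + 1)]
--     dp[0][0] = 0
--
--     for i in range(BMAX):
--         now = BMAX - 1 - i
--         p0 = 2 ** now * d[now]
--         p1 = 2 ** now * (N - d[now])
--
--         is_one = (K & 1 << now) != 0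
--
--         if dp[i][1] != -1:
--             dp[i + 1][1] = dp[i][1] + max(p1, p0)
--
--         if dp[i][0] != -1 and is_one:
--             dp[i + 1][1] = max(dp[i + 1][1], dp[i][0] + p0)
--
--         if dp[i][0] != -1:
--             dp[i + 1][0] = dp[i][0] + (p1 if is_one else p0)
--
--     return max(dp[-1])
-- ===== SOURCE B (Python) =====
-- def find_max_f_value(N, K, A):
--     BMAX = 40
--     d = [0] * BMAX
--     for a in A:
--         for i in range(BMAX):
--             if a & 1 << i:
--                 d[i] += 1
--     # total of max(p0, p1) over all 40 bit positions ("everything free")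
--     Ftot = 0
--     for i in range(BMAX):
--         p0 = 2 ** i * d[i]
--         p1 = 2 ** i * (N - d[i])
--         Ftot += max(p0, p1)
--     # one tight walk from the high bit down; at every set bit of K branch once
--     # to "go below K here": higher bits tight + p0 here + free for lower bits.
--     tight = 0
--     best = -1
--     used = 0
--     for now in range(BMAX - 1, -1, -1):
--         p0 = 2 ** now * d[now]
--         p1 = 2 ** now * (N - d[now])
--         used += max(p0, p1)
--         if K & 1 << now:
--             best = max(best, tight + p0 + (Ftot - used))
--             tight += p1
--         else:
--             tight += p0
--     return max(tight, best)
-- ===== Notes on version B (the rewrite author's own statement) =====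
-- stated objective: alternative
-- what changed: Replaces A's two-state forward DP over a 41x2 table (tight/free rows with -1 reachability sentinels) by a single tight walk down the bits that directly enumerates the branch points of K, each candidate closed with a precomputed total of the per-bit free optima.
import Mathlib
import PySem

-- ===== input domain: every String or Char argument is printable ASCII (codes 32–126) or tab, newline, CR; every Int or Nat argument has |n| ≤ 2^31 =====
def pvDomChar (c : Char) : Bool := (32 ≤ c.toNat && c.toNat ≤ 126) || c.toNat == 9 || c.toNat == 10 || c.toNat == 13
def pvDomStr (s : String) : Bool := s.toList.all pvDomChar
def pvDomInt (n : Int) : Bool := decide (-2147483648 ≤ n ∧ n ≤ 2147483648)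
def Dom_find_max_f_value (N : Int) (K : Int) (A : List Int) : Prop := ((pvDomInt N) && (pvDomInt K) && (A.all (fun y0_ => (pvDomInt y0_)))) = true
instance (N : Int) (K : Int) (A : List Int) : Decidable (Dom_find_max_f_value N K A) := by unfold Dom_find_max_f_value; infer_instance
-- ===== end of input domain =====

-- B replaces A's two-state (tight/free) forward bit DP by one tight walk that
-- enumerates the branch points directly, using a precomputed total of the
-- per-bit free optima; same cost, different decomposition (objective: alternative).

-- ===== PORT A =====
-- shared helpers: the bit-count table d (the same loop opens both Pythons) and
-- the per-bit quantities p0, p1 and the bit test of K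
def pvCountD (A : List Int) : List Int :=
  A.foldl (fun d a =>
    (List.range 40).foldl (fun d (i : Nat) =>
      if PySem.Int.band a ((1:Int) <<< i) ≠ 0 then d.set i (d.getD i 0 + 1) else d) d)
    (List.replicate 40 (0:Int))

def pvP0 (d : List Int) (now : Nat) : Int := (2:Int) ^ now * d.getD now 0
def pvP1 (N : Int) (d : List Int) (now : Nat) : Int := (2:Int) ^ now * (N - d.getD now 0)
def pvIsOne (K : Int) (now : Nat) : Bool := PySem.Int.band K ((1:Int) <<< now) != 0

-- one iteration of A's dp loop; the dp rows are carried as the pair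
-- (dp[i][0], dp[i][1]) since row i+1 only reads row i; sentinel -1 as in A
def pvStepA (N : Int) (K : Int) (d : List Int) (s : Int × Int) (i : Nat) : Int × Int :=
  ( if s.1 ≠ -1 then s.1 + (if pvIsOne K (39 - i) then pvP1 N d (39 - i) else pvP0 d (39 - i)) else -1,
    if s.1 ≠ -1 ∧ pvIsOne K (39 - i) = true
      then max (if s.2 ≠ -1 then s.2 + max (pvP1 N d (39 - i)) (pvP0 d (39 - i)) else -1) (s.1 + pvP0 d (39 - i))
      else (if s.2 ≠ -1 then s.2 + max (pvP1 N d (39 - i)) (pvP0 d (39 - i)) else -1) )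

def find_max_f_value (N : Int) (K : Int) (A : List Int) : Int :=
  let d := pvCountD A
  let fin := (List.range 40).foldl (pvStepA N K d) (0, -1)
  max fin.1 fin.2

-- ===== PORT B =====
-- one iteration of B's downward walk; state (tight, best, used)
def pvStepB (N : Int) (K : Int) (d : List Int) (Ftot : Int) (s : Int × Int × Int) (now : Nat) : Int × Int × Int :=
  if pvIsOne K now
    then (s.1 + pvP1 N d now,
          max s.2.1 (s.1 + pvP0 d now + (Ftot - (s.2.2 + max (pvP0 d now) (pvP1 N d now)))),
          s.2.2 + max (pvP0 d now) (pvP1 N d now))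
    else (s.1 + pvP0 d now, s.2.1, s.2.2 + max (pvP0 d now) (pvP1 N d now))

def find_max_f_value_alt (N : Int) (K : Int) (A : List Int) : Int :=
  let d := pvCountD A
  let Ftot := (List.range 40).foldl (fun s i => s + max (pvP0 d i) (pvP1 N d i)) 0
  let fin := ((List.range 40).reverse).foldl (pvStepB N K d Ftot) (0, -1, 0)
  max fin.1 fin.2.1

-- ===== PRECONDITION & SPEC =====
def Spec_find_max_f_value (N : Int) (K : Int) (A : List Int) (out : Int) : Prop := out = find_max_f_value_alt N K A
instance (N : Int) (K : Int) (A : List Int) (out : Int) : Decidable (Spec_find_max_f_value N K A out) := by unfold Spec_find_max_f_value; infer_instance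

-- ===== CLAIM (what is proved, stated in full; the proofs are below) =====
def Claim_equal_find_max_f_value : Prop := ∀ (N : Int) (K : Int) (A : List Int), Dom_find_max_f_value N K A → Spec_find_max_f_value N K A (find_max_f_value N K A)

-- ===== LEMMAS AND PROOFS =====

-- A's step re-indexed by the bit position `now` instead of the loop counter i
def pvStepA' (N : Int) (K : Int) (d : List Int) (s : Int × Int) (now : Nat) : Int × Int :=
  ( if s.1 ≠ -1 then s.1 + (if pvIsOne K now then pvP1 N d now else pvP0 d now) else -1,
    if s.1 ≠ -1 ∧ pvIsOne K now = true
      then max (if s.2 ≠ -1 then s.2 + max (pvP1 N d now) (pvP0 d now) else -1) (s.1 + pvP0 d now)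
      else (if s.2 ≠ -1 then s.2 + max (pvP1 N d now) (pvP0 d now) else -1) )

-- sum of the per-bit free optimum max(p0,p1) over the bits below m
def pvFree (N : Int) (d : List Int) : Nat → Int
  | 0 => 0
  | m + 1 => pvFree N d m + max (pvP0 d m) (pvP1 N d m)

-- the descending bit list [39, 38, …, 40 - n]
def pvBits : Nat → List Nat
  | 0 => []
  | n + 1 => pvBits n ++ [39 - n]

-- the joint loop invariant at stage m (bits ≥ m already processed)
def pvRel (N : Int) (d : List Int) (m : Nat) (sA : Int × Int) (sB : Int × Int × Int) : Prop :=
  sA.1 = sB.1 ∧ (2:Int) ^ m ∣ sA.1 ∧ sB.2.2 = pvFree N d 40 - pvFree N d m ∧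
  ((sA.2 = -1 ∧ sB.2.1 = -1 ∧ 0 ≤ sA.1) ∨
   (sA.2 = sB.2.1 - pvFree N d m ∧ (2:Int) ^ m ∣ sA.2))

theorem pvSet_nonneg (l : List Int) (hl : ∀ j, 0 ≤ l.getD j 0) (i : Nat) :
    ∀ j, 0 ≤ (l.set i (l.getD i 0 + 1)).getD j 0 := by
  intro j
  have hj := hl j
  have hi := hl i
  simp only [List.getD_eq_getElem?_getD] at hj hi ⊢
  rw [List.getElem?_set]
  split
  · split
    · simp only [Option.getD_some]; linarith
    · simp
  · exact hj

theorem pvInner_nonneg (a : Int) (is : List Nat) :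
    ∀ (l : List Int), (∀ j, 0 ≤ l.getD j 0) →
      ∀ j, 0 ≤ (is.foldl (fun d (i : Nat) =>
        if PySem.Int.band a ((1:Int) <<< i) ≠ 0 then d.set i (d.getD i 0 + 1) else d) l).getD j 0 := by
  induction is with
  | nil => intro l hl j; exact hl j
  | cons i is ih =>
      intro l hl j
      simp only [List.foldl_cons]
      split
      · exact ih _ (pvSet_nonneg l hl i) j
      · exact ih _ hl j

theorem pvCountD_nonneg (A : List Int) : ∀ j, 0 ≤ (pvCountD A).getD j 0 := by
  unfold pvCountD
  induction A using List.reverseRecOn with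
  | nil =>
      intro j
      simp only [List.foldl_nil, List.getD_eq_getElem?_getD, List.getElem?_replicate]
      split <;> simp
  | append_singleton A a ih =>
      intro j
      rw [List.foldl_append, List.foldl_cons, List.foldl_nil]
      exact pvInner_nonneg a (List.range 40) _ ih j

theorem pvP0_nonneg (d : List Int) (hd : ∀ j, 0 ≤ d.getD j 0) (j : Nat) : 0 ≤ pvP0 d j :=
  mul_nonneg (pow_nonneg (by norm_num) _) (hd j)

theorem pvFree_nonneg (N : Int) (d : List Int) (hd : ∀ j, 0 ≤ d.getD j 0) :
    ∀ m, 0 ≤ pvFree N d m := by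
  intro m
  induction m with
  | zero => simp [pvFree]
  | succ m ih =>
      have h0 : 0 ≤ max (pvP0 d m) (pvP1 N d m) := le_trans (pvP0_nonneg d hd m) (le_max_left _ _)
      simp only [pvFree]; linarith

theorem pvEven_ne_neg_one (x : Int) (t : Nat) (h : (2:Int) ^ (t + 1) ∣ x) : x ≠ -1 := by
  have h2 : (2:Int) ∣ x := dvd_trans ⟨2 ^ t, by rw [pow_succ]; ring⟩ h
  obtain ⟨c, hc⟩ := h2
  intro he; rw [he] at hc; omega

theorem pvStep_pres (N K : Int) (d : List Int) (hd : ∀ j, 0 ≤ d.getD j 0) (t : Nat)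
    (sA : Int × Int) (sB : Int × Int × Int) (h : pvRel N d (t + 1) sA sB) :
    pvRel N d t (pvStepA' N K d sA t) (pvStepB N K d (pvFree N d 40) sB t) := by
  obtain ⟨h1, hdvd0, hused, hcase⟩ := h
  have hp0 : 0 ≤ pvP0 d t := pvP0_nonneg d hd t
  have hfree : 0 ≤ pvFree N d t := pvFree_nonneg N d hd t
  have hfsucc : pvFree N d (t + 1) = pvFree N d t + max (pvP0 d t) (pvP1 N d t) := rfl
  have hmc : max (pvP1 N d t) (pvP0 d t) = max (pvP0 d t) (pvP1 N d t) := max_comm _ _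
  have hdvdp0 : (2:Int) ^ t ∣ pvP0 d t := dvd_mul_right _ _
  have hdvdp1 : (2:Int) ^ t ∣ pvP1 N d t := dvd_mul_right _ _
  have hdvdmax : (2:Int) ^ t ∣ max (pvP1 N d t) (pvP0 d t) := by
    rcases max_choice (pvP1 N d t) (pvP0 d t) with hm | hm <;> rw [hm] <;> assumption
  have hstep : ∀ x : Int, (2:Int) ^ (t + 1) ∣ x → (2:Int) ^ t ∣ x :=
    fun x hx => dvd_trans (pow_dvd_pow 2 (Nat.le_succ t)) hx
  have hx0ne : sA.1 ≠ -1 := pvEven_ne_neg_one _ t hdvd0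
  unfold pvStepA' pvStepB pvRel
  by_cases hone : pvIsOne K t = true
  · rcases hcase with ⟨e1, e2, hnn⟩ | ⟨e1, hdvd1⟩
    · -- dead (no branch point seen yet): the first branch is created here
      simp only [hone, if_true, hx0ne, e1, e2, ne_eq, not_true_eq_false, if_false,
        and_true, not_false_eq_true, if_true]
      have hv : max (-1) (sA.1 + pvP0 d t) = sA.1 + pvP0 d t :=
        max_eq_right (by linarith)
      have hused' : sB.2.2 + max (pvP0 d t) (pvP1 N d t) = pvFree N d 40 - pvFree N d t := by
        rw [hused]; linarith
      have hvb : max (-1) (sB.1 + pvP0 d t + (pvFree N d 40 - (sB.2.2 + max (pvP0 d t) (pvP1 N d t)))) =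
          sB.1 + pvP0 d t + pvFree N d t := by
        rw [hused']
        have : sB.1 + pvP0 d t + (pvFree N d 40 - (pvFree N d 40 - pvFree N d t)) =
            sB.1 + pvP0 d t + pvFree N d t := by ring
        rw [this]
        exact max_eq_right (by rw [← h1]; linarith)
      refine ⟨by rw [h1], dvd_add (hstep _ hdvd0) hdvdp1, by rw [hused]; linarith,
        Or.inr ⟨?_, ?_⟩⟩
      · rw [hv, hvb, ← h1]; ring
      · rw [hv]; exact dvd_add (hstep _ hdvd0) hdvdp0
    · -- alive: shift the running best by the free sum of the lower bits
      have hx1ne : sA.2 ≠ -1 := pvEven_ne_neg_one _ t hdvd1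
      simp only [hone, if_true, hx0ne, hx1ne, ne_eq, not_false_eq_true, if_true, and_true]
      have hused' : sB.2.2 + max (pvP0 d t) (pvP1 N d t) = pvFree N d 40 - pvFree N d t := by
        rw [hused]; linarith
      refine ⟨by rw [h1], dvd_add (hstep _ hdvd0) hdvdp1, hused', Or.inr ⟨?_, ?_⟩⟩
      · have ha : sA.2 + max (pvP1 N d t) (pvP0 d t) = sB.2.1 - pvFree N d t := by
          rw [e1, hmc, hfsucc]; ring
        have hb : sA.1 + pvP0 d t =
            (sB.1 + pvP0 d t + (pvFree N d 40 - (sB.2.2 + max (pvP0 d t) (pvP1 N d t)))) - pvFree N d t := by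
          rw [hused', ← h1]; ring
        rw [ha, hb, max_sub_sub_right]
      · rcases max_choice (sA.2 + max (pvP1 N d t) (pvP0 d t)) (sA.1 + pvP0 d t) with hm | hm <;>
          rw [hm]
        · exact dvd_add (hstep _ hdvd1) hdvdmax
        · exact dvd_add (hstep _ hdvd0) hdvdp0
  · -- K's bit is 0 here: both sides just stay tight
    simp only [Bool.not_eq_true] at hone
    simp only [hone, Bool.false_eq_true, if_false, hx0ne, ne_eq, not_false_eq_true, if_true, and_false]
    have hused' : sB.2.2 + max (pvP0 d t) (pvP1 N d t) = pvFree N d 40 - pvFree N d t := by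
      rw [hused]; linarith
    refine ⟨by rw [h1], dvd_add (hstep _ hdvd0) hdvdp0, hused', ?_⟩
    rcases hcase with ⟨e1, e2, hnn⟩ | ⟨e1, hdvd1⟩
    · exact Or.inl ⟨by simp [e1], e2, by linarith⟩
    · have hx1ne : sA.2 ≠ -1 := pvEven_ne_neg_one _ t hdvd1
      rw [if_pos hx1ne]
      refine Or.inr ⟨by rw [e1, hmc, hfsucc]; ring, dvd_add (hstep _ hdvd1) hdvdmax⟩

theorem pvInv (N K : Int) (d : List Int) (hd : ∀ j, 0 ≤ d.getD j 0) :
    ∀ n, n ≤ 40 →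
      pvRel N d (40 - n) ((pvBits n).foldl (pvStepA' N K d) (0, -1))
        ((pvBits n).foldl (pvStepB N K d (pvFree N d 40)) (0, -1, 0)) := by
  intro n
  induction n with
  | zero =>
      intro _
      refine ⟨rfl, dvd_zero _, by simp [pvBits], Or.inl ⟨rfl, rfl, le_refl _⟩⟩
  | succ n ih =>
      intro h
      have hn : n ≤ 40 := by omega
      have ht : 39 - n = 40 - (n + 1) := by omega
      have h40 : 40 - n = (40 - (n + 1)) + 1 := by omega
      have hprev := ih hn
      rw [h40] at hprev
      have hstep := pvStep_pres N K d hd (40 - (n + 1)) _ _ hprev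
      have hb : pvBits (n + 1) = pvBits n ++ [39 - n] := rfl
      rw [hb, List.foldl_append, List.foldl_append, List.foldl_cons, List.foldl_nil,
        List.foldl_cons, List.foldl_nil, ht]
      exact hstep

theorem pvFtot_fold_aux (N : Int) (d : List Int) :
    ∀ n s, (List.range n).foldl (fun s i => s + max (pvP0 d i) (pvP1 N d i)) s = s + pvFree N d n := by
  intro n
  induction n with
  | zero => intro s; simp [pvFree]
  | succ n ih =>
      intro s
      rw [List.range_succ, List.foldl_append, ih, List.foldl_cons, List.foldl_nil]
      simp [pvFree]; ring

theorem pvFtot_fold (N : Int) (d : List Int) :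
    ∀ n, (List.range n).foldl (fun s i => s + max (pvP0 d i) (pvP1 N d i)) 0 = pvFree N d n := by
  intro n; rw [pvFtot_fold_aux]; ring

-- ===== VERDICT (by name: the statement is the Claim_ definition above) =====
theorem find_max_f_value_spec : Claim_equal_find_max_f_value := by
  intro N K A _
  show find_max_f_value N K A = find_max_f_value_alt N K A
  have hdn := pvCountD_nonneg A
  have hmap : (List.range 40).map (fun i => 39 - i) = pvBits 40 := by decide
  have hrev : (List.range 40).reverse = pvBits 40 := by decide
  simp only [find_max_f_value, find_max_f_value_alt]
  rw [hrev, pvFtot_fold]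
  have hA : (List.range 40).foldl (pvStepA N K (pvCountD A)) (0, -1)
      = (pvBits 40).foldl (pvStepA' N K (pvCountD A)) (0, -1) := by
    rw [← hmap, List.foldl_map]
    rfl
  rw [hA]
  obtain ⟨h1, -, -, hcase⟩ := pvInv N K (pvCountD A) hdn 40 le_rfl
  rcases hcase with ⟨e1, e2, -⟩ | ⟨e1, -⟩
  · rw [h1, e1, e2]
  · rw [h1, e1]; simp [pvFree]
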